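-- pv_equiv track=rewrite | github.com/Emrebsr21/BinaryTextCorrection | BinaryTextCorrection.py | clean_up_words
-- ===== SOURCE A (Python) =====
-- def clean_up_words(dictionary, text):
--     lines = text.split('\n')  # Split the text by new lines to preserve them in the corrected version
--     corrected_lines = []
--     for line in lines:
--         words = line.split()  # Split line into words
--         corrected_line = ""
--         for word in words:
--             punctuation = ""                # Separate punctuation from the end if it exists
--             if not word[-1].isalpha():
--                 punctuation = word[-1]
--                 word = word[:-1]
--
--             if word.isalpha():  # Check if the word is alphabetic
--                 is_capitalized = word[0].isupper()  # Check if the word is capitalized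
--                 word_lower = word.lower()
--                 if word_lower not in dictionary:  # Attempt to find the most similar word in the dictionary
--                     similar_words = [
--                         obj for obj in dictionary
--                         if len(obj) == len(word) and obj[0].lower() == word_lower[0] and obj[-1].lower() == word_lower[-1]
--                     ]
--                     if similar_words:                           # Find the word with the most matching characters
--                         best_match = None
--                         max_match = -1
--                         for obj in similar_words:
--                             match_count = sum(1 for ch in obj if ch in word_lower)
--                             if match_count > max_match:
--                                 max_match = match_count
--                                 best_match = obj
--
--                         best_match_corrected = best_match.capitalize() if is_capitalized else best_match                         # Capitalize the matched word if the original word was capitalized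
--                         corrected_line += best_match_corrected
--                     else:
--                         corrected_line += word
--                 else:
--                     corrected_line += word
--             else:
--                 corrected_line += word  # Add punctuation marks
--
--             corrected_line += " "  # Add a space after each word
--         corrected_lines.append(corrected_line.strip())
--     return text, '\n'.join(corrected_lines).strip()
-- ===== SOURCE B (Python) =====
-- def clean_up_words(dictionary, text):
--     # Bucket the dictionary once by (length, first letter lowered, last letter lowered),
--     # preserving order, so each word consults only its own small bucket.
--     index = {}
--     for obj in dictionary:
--         if obj:
--             index.setdefault((len(obj), obj[0].lower(), obj[-1].lower()), []).append(obj)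
--     dict_set = set(dictionary)
--
--     def fix(word):
--         if not word[-1].isalpha():
--             word = word[:-1]
--         if not word.isalpha():
--             return word
--         word_lower = word.lower()
--         if word_lower in dict_set:
--             return word
--         bucket = index.get((len(word), word_lower[0], word_lower[-1]), [])
--         if not bucket:
--             return word
--         best = max(bucket, key=lambda obj: sum(1 for ch in obj if ch in word_lower))
--         return best.capitalize() if word[0].isupper() else best
--
--     corrected = '\n'.join(
--         ' '.join(fix(w) for w in line.split()).strip()
--         for line in text.split('\n')
--     ).strip()
--     return text, corrected
-- ===== Notes on version B (the rewrite author's own statement) =====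
-- stated objective: alternative
-- what changed: B precomputes a dictionary index keyed by (length, lowered first char, lowered last char) plus a membership set, so each word looks up its bucket instead of scanning the whole dictionary; per-line output is built with ' '.join over a map instead of string accumulation, and the first-maximal match is picked with max(key=...).
import Mathlib
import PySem

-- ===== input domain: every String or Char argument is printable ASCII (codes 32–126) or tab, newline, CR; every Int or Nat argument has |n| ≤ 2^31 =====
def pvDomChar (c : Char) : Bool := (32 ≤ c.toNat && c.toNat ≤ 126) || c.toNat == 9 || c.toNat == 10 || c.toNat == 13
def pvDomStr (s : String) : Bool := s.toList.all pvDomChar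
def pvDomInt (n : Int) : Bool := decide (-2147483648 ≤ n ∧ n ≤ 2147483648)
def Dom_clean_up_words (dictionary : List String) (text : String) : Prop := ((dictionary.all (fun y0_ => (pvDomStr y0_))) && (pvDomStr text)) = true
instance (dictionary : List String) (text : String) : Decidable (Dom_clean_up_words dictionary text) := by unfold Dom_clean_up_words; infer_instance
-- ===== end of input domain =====

-- B replaces A's per-word scan of the whole dictionary with a precomputed bucket index
-- keyed by (length, lowered first char, lowered last char) plus a membership set.


-- ===== PORT A =====
-- shared helpers (this code is verbatim identical in A and in B):
-- 'if not word[-1].isalpha(): punctuation = word[-1]; word = word[:-1]' (words from split() are never empty)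
def pvStripPunct (w0 : List Char) : List Char :=
  match PySem.List.pyGet? w0 (-1) with
  | some c => if !PySem.Chars.isalpha c then PySem.Chars.slice w0 none (some (-1)) else w0
  | none => w0

-- sum(1 for ch in obj if ch in word_lower): 'ch in s' for a single char is list membership (exact)
def pvMatchCount (obj wl : List Char) : Int :=
  obj.foldl (fun acc ch => if ch ∈ wl then acc + 1 else acc) 0

-- str.capitalize(): first char upper-cased (title-case = upper on ASCII), rest lower-cased (exact on ASCII)
def pvCapitalize (s : List Char) : List Char :=
  match s with
  | [] => []
  | c :: rest => PySem.Chars.upperChar c :: PySem.Chars.lower rest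

-- word[0].isupper()
def pvIsCap (w : List Char) : Bool :=
  match PySem.List.pyGet? w 0 with | some c => PySem.Chars.isupper c | none => false

-- the body of A's inner loop: the piece appended for one word (before the trailing " ")
def pvAFix (dict : List (List Char)) (w0 : List Char) : List Char :=
  let w := pvStripPunct w0
  if PySem.Chars.strIsalpha w then
    let isCap := pvIsCap w
    let wl := PySem.Chars.lower w
    if wl ∈ dict then w
    else
      -- obj[0].lower()/obj[-1].lower() on a 1-char string = lowerChar; the len test short-circuits first
      let similar := dict.filter (fun obj =>
        decide (obj.length = w.length) &&
        ((PySem.List.pyGet? obj 0).map PySem.Chars.lowerChar == PySem.List.pyGet? wl 0) &&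
        ((PySem.List.pyGet? obj (-1)).map PySem.Chars.lowerChar == PySem.List.pyGet? wl (-1)))
      match similar with
      | [] => w
      | _ :: _ =>
        let best := (similar.foldl (fun acc obj =>
            let mc := pvMatchCount obj wl
            if mc > acc.2 then (some obj, mc) else acc)
            ((none : Option (List Char)), (-1 : Int))).1
        match best with
        | some b => if isCap then pvCapitalize b else b
        | none => w
  else w

def clean_up_words (dictionary : List String) (text : String) : String × String :=
  let dict := dictionary.map String.toList
  let lines := PySem.Chars.splitOn text.toList ['\n']
  let corrected_lines := lines.foldl (fun acc line =>
    let words := PySem.Chars.split₀ line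
    let corrected_line := words.foldl (fun cl w => cl ++ pvAFix dict w ++ [' ']) []
    acc ++ [PySem.Chars.strip corrected_line]) []
  (text, String.ofList (PySem.Chars.strip (PySem.Chars.join ['\n'] corrected_lines)))

-- ===== PORT B =====
-- (len(obj), obj[0].lower(), obj[-1].lower()) for a non-empty obj, none for '' (skipped by 'if obj:')
def pvKey? (obj : List Char) : Option (Int × Char × Char) :=
  match PySem.List.pyGet? obj 0, PySem.List.pyGet? obj (-1) with
  | some c0, some c1 => some ((obj.length : Int), PySem.Chars.lowerChar c0, PySem.Chars.lowerChar c1)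
  | _, _ => none

-- index.setdefault(key, []).append(obj)
def pvIndex (dict : List (List Char)) : PySem.Dict (Int × Char × Char) (List (List Char)) :=
  dict.foldl (fun d obj =>
    match pvKey? obj with
    | some k => d.insert k (d.getD k [] ++ [obj])
    | none => d) PySem.Dict.empty

-- B's fix(word)
def pvBFix (index : PySem.Dict (Int × Char × Char) (List (List Char)))
    (dset : PySem.Set (List Char)) (w0 : List Char) : List Char :=
  let w := pvStripPunct w0
  if !PySem.Chars.strIsalpha w then w
  else
    let wl := PySem.Chars.lower w
    if dset.contains wl then w
    else
      match PySem.List.pyGet? wl 0, PySem.List.pyGet? wl (-1) with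
      | some a, some b =>
        let bucket := index.getD ((w.length : Int), a, b) []
        -- max(bucket, key=...) is PySem.List.max? (first maximal element)
        match PySem.List.max? bucket (fun obj => pvMatchCount obj wl) with
        | none => w
        | some best => if pvIsCap w then pvCapitalize best else best
      | _, _ => w

def clean_up_words_alt (dictionary : List String) (text : String) : String × String :=
  let dict := dictionary.map String.toList
  let index := pvIndex dict
  let dset := PySem.Set.ofList dict
  let corrected := PySem.Chars.strip (PySem.Chars.join ['\n']
    ((PySem.Chars.splitOn text.toList ['\n']).map (fun line =>
      PySem.Chars.strip (PySem.Chars.join [' '] ((PySem.Chars.split₀ line).map (pvBFix index dset))))))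
  (text, String.ofList corrected)

-- ===== PRECONDITION & SPEC =====
def Spec_clean_up_words (dictionary : List String) (text : String) (out : String × String) : Prop := out = clean_up_words_alt dictionary text
instance (dictionary : List String) (text : String) (out : String × String) : Decidable (Spec_clean_up_words dictionary text out) := by unfold Spec_clean_up_words; infer_instance

-- ===== CLAIM (what is proved, stated in full; the proofs are below) =====
def Claim_equal_clean_up_words : Prop := ∀ (dictionary : List String) (text : String), Dom_clean_up_words dictionary text → Spec_clean_up_words dictionary text (clean_up_words dictionary text)

-- ===== LEMMAS AND PROOFS =====

theorem pvMatchCount_nonneg (obj wl : List Char) : 0 ≤ pvMatchCount obj wl := by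
  unfold pvMatchCount
  rw [PySem.List.foldl_ite_add_one]
  positivity

theorem pv_pyGet?_zero {α : Type} (xs : List α) : PySem.List.pyGet? xs 0 = xs.head? := by
  have h := PySem.List.pyGet?_natCast xs 0
  cases xs <;> simpa using h

theorem pv_pyGet?_neg_one {α : Type} (xs : List α) : PySem.List.pyGet? xs (-1) = xs.getLast? := by
  cases xs with
  | nil => rfl
  | cons a t =>
    unfold PySem.List.pyGet? PySem.List.pyIdx?
    have h1 : ¬ ((0:Int) ≤ -1) := by norm_num
    have h2 : -((a :: t).length : Int) ≤ -1 := by simp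
    rw [if_neg h1, if_pos h2]
    simp [List.getLast?_eq_getElem?]

-- the Option-wrapped running-max fold of max? equals the plain running max
theorem pv_max?_opt {α : Type} (key : α → Int) (l : List α) :
    ∀ (x : α),
    (l.foldl (fun acc y =>
        match acc with
        | none => some y
        | some m => if key m < key y then some y else some m) (some x))
      = some (l.foldl (fun m y => if key m < key y then y else m) x) := by
  induction l with
  | nil => intro x; rfl
  | cons y t ih =>
    intro x
    simp only [List.foldl_cons]
    by_cases h : key x < key y <;> simp [h, ih]

theorem pv_max?_cons (key : List Char → Int) (x : List Char) (l : List (List Char)) :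
    PySem.List.max? (x :: l) key
      = some (l.foldl (fun m y => if key m < key y then y else m) x) := by
  unfold PySem.List.max?
  simp only [List.foldl_cons]
  exact pv_max?_opt key l x

-- A's (best, max) loop, once past its first step, is the plain running max
theorem pv_aloop (key : List Char → Int) (l : List (List Char)) :
    ∀ (m : List Char),
    (l.foldl (fun acc obj => if key obj > acc.2 then (some obj, key obj) else acc)
        ((some m : Option (List Char)), key m)).1
      = some (l.foldl (fun m y => if key m < key y then y else m) m) := by
  induction l with
  | nil => intro m; rfl
  | cons y t ih =>
    intro m
    simp only [List.foldl_cons]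
    by_cases h : key m < key y
    · simpa [h, gt_iff_lt] using ih y
    · simpa [h, gt_iff_lt] using ih m

theorem pv_getD_aux (dict : List (List Char)) (k : Int × Char × Char) :
    ∀ (d : PySem.Dict (Int × Char × Char) (List (List Char))),
    (dict.foldl (fun d obj =>
      match pvKey? obj with
      | some k' => d.insert k' (d.getD k' [] ++ [obj])
      | none => d) d).getD k []
      = d.getD k [] ++ dict.filter (fun obj => pvKey? obj == some k) := by
  induction dict with
  | nil => intro d; simp
  | cons o t ih =>
    intro d
    simp only [List.foldl_cons, List.filter_cons]
    cases h : pvKey? o with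
    | none => simp [h, ih]
    | some k' =>
      by_cases hk : k = k'
      · subst hk
        simp [h, ih, PySem.Dict.getD_insert]
      · have hne : ¬ (k' = k) := fun hh => hk hh.symm
        simp [h, ih, PySem.Dict.getD_insert, hk, hne]

-- the bucket for key k is exactly the order-preserving filter of the dictionary
theorem pv_getD_pvIndex (dict : List (List Char)) (k : Int × Char × Char) :
    (pvIndex dict).getD k [] = dict.filter (fun obj => pvKey? obj == some k) := by
  unfold pvIndex
  simpa using pv_getD_aux dict k PySem.Dict.empty

-- per-word agreement
theorem pv_fix_eq (dict : List (List Char)) (w0 : List Char) :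
    pvBFix (pvIndex dict) (PySem.Set.ofList dict) w0 = pvAFix dict w0 := by
  unfold pvBFix pvAFix
  simp only []
  generalize pvStripPunct w0 = w
  by_cases halpha : PySem.Chars.strIsalpha w
  case neg => simp [halpha]
  simp only [halpha, Bool.not_true, if_true, Bool.false_eq_true, if_false]
  -- w is a non-empty all-alpha word
  have hwne : w ≠ [] := by
    unfold PySem.Chars.strIsalpha at halpha
    cases w <;> simp_all
  have hwlne : PySem.Chars.lower w ≠ [] := by
    unfold PySem.Chars.lower; simpa using hwne
  -- membership test: set vs list
  by_cases hmem : PySem.Chars.lower w ∈ dict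
  · have : (PySem.Set.ofList dict).contains (PySem.Chars.lower w) = true := by
      rw [PySem.Set.contains_iff]; exact (PySem.Set.mem_ofList dict _).mpr hmem
    simp [this, hmem]
  · have hc : (PySem.Set.ofList dict).contains (PySem.Chars.lower w) = false := by
      rw [Bool.eq_false_iff]
      intro hh
      exact hmem ((PySem.Set.mem_ofList dict _).mp ((PySem.Set.contains_iff _ _).mp hh))
    simp only [hc, hmem, if_false, Bool.false_eq_true]
    -- the first/last chars of wl exist
    obtain ⟨a, wlt, hwl⟩ : ∃ a t, PySem.Chars.lower w = a :: t := by
      cases hx : PySem.Chars.lower w with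
      | nil => exact absurd hx hwlne
      | cons a t => exact ⟨a, t, rfl⟩
    have h0 : PySem.List.pyGet? (PySem.Chars.lower w) 0 = some ((PySem.Chars.lower w).head hwlne) := by
      rw [pv_pyGet?_zero, List.head?_eq_head]
    have h1 : PySem.List.pyGet? (PySem.Chars.lower w) (-1)
        = some ((PySem.Chars.lower w).getLast hwlne) := by
      rw [pv_pyGet?_neg_one, List.getLast?_eq_getLast]
    rw [h0, h1]
    -- the bucket equals A's 'similar' list
    have hbucket : (pvIndex dict).getD
        ((w.length : Int), (PySem.Chars.lower w).head hwlne, (PySem.Chars.lower w).getLast hwlne) []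
        = dict.filter (fun obj =>
            decide (obj.length = w.length) &&
            ((PySem.List.pyGet? obj 0).map PySem.Chars.lowerChar == some ((PySem.Chars.lower w).head hwlne)) &&
            ((PySem.List.pyGet? obj (-1)).map PySem.Chars.lowerChar == some ((PySem.Chars.lower w).getLast hwlne))) := by
      rw [pv_getD_pvIndex]
      apply List.filter_congr
      intro obj _
      cases obj with
      | nil =>
        have hlen : w.length ≠ 0 := by simpa using hwne
        simp [pvKey?, PySem.List.pyGet?, PySem.List.pyIdx?]
      | cons c cs =>
        have hone : (c :: cs : List Char) ≠ [] := by simp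
        unfold pvKey?
        rw [pv_pyGet?_zero, pv_pyGet?_neg_one, List.head?_eq_head (l := c :: cs) hone,
          List.getLast?_eq_getLast hone]
        simp only [Option.map_some]
        apply Bool.eq_iff_iff.mpr
        simp only [Bool.and_eq_true, decide_eq_true_eq, beq_iff_eq, Prod.mk.injEq, Prod.ext_iff,
          List.length_cons]
        simp only [Option.some.injEq, Prod.mk.injEq]
        constructor
        · rintro ⟨hl, hc0, hcl⟩
          exact ⟨⟨by omega, hc0⟩, hcl⟩
        · rintro ⟨⟨hl, hc0⟩, hcl⟩
          exact ⟨by omega, hc0, hcl⟩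
    simp only [hbucket]
    -- the max? of the bucket equals A's strict-improvement loop
    cases hsim : dict.filter (fun obj =>
        decide (obj.length = w.length) &&
        ((PySem.List.pyGet? obj 0).map PySem.Chars.lowerChar == some ((PySem.Chars.lower w).head hwlne)) &&
        ((PySem.List.pyGet? obj (-1)).map PySem.Chars.lowerChar == some ((PySem.Chars.lower w).getLast hwlne))) with
    | nil => simp [PySem.List.max?]
    | cons s rest =>
      simp only [List.foldl_cons]
      have hfirst : ((-1 : Int) < pvMatchCount s (PySem.Chars.lower w)) := by
        have := pvMatchCount_nonneg s (PySem.Chars.lower w)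
        omega
      rw [pv_max?_cons]
      simp only [gt_iff_lt, hfirst, if_pos]
      rw [pv_aloop (fun obj => pvMatchCount obj (PySem.Chars.lower w)) rest s]

-- a trailing space does not change strip
theorem pv_strip_append_space (l : List Char) :
    PySem.Chars.strip (l ++ [' ']) = PySem.Chars.strip l := by
  have hsp : PySem.Chars.isspace ' ' = true := by decide
  unfold PySem.Chars.strip PySem.Chars.lstrip PySem.Chars.rstrip
  rw [List.dropWhile_append]
  by_cases h : (List.dropWhile PySem.Chars.isspace l).isEmpty
  · rw [List.isEmpty_iff] at h
    rw [if_pos (by simp [h])]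
    rw [h]
    simp [List.dropWhile, hsp]
  · rw [if_neg (by simp [List.isEmpty_iff] at h ⊢; exact h)]
    rw [List.reverse_append]
    simp [List.dropWhile, hsp]

-- '+= piece; += " "' accumulation then strip = ' '.join(pieces).strip()
theorem pv_line_eq (f : List Char → List Char) (ws : List (List Char)) :
    PySem.Chars.strip (ws.foldl (fun cl w => cl ++ f w ++ [' ']) [])
      = PySem.Chars.strip (PySem.Chars.join [' '] (ws.map f)) := by
  have h1 : ws.foldl (fun cl w => cl ++ f w ++ [' ']) []
      = ws.flatMap (fun w => f w ++ [' ']) := by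
    have := PySem.List.foldl_append_eq_flatMap (fun w => f w ++ [' ']) ws []
    simpa [List.append_assoc] using this
  rw [h1]
  cases ws with
  | nil => simp [PySem.Chars.join, List.intercalate]
  | cons a t =>
    have h2 : ∀ (t : List (List Char)) (a : List Char),
        (a :: t).flatMap (fun w => f w ++ [' '])
          = PySem.Chars.join [' '] ((a :: t).map f) ++ [' '] := by
      intro t
      induction t with
      | nil => intro a; simp [PySem.Chars.join, List.intercalate]
      | cons b t ih =>
        intro a
        simp only [List.flatMap_cons] at *
        rw [ih b]
        simp [PySem.Chars.join, List.intercalate]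
    rw [h2]
    exact pv_strip_append_space _

-- ===== VERDICT (by name: the statement is the Claim_ definition above) =====
theorem clean_up_words_spec : Claim_equal_clean_up_words := by
  intro dictionary text _
  unfold Spec_clean_up_words clean_up_words clean_up_words_alt
  simp only []
  refine Prod.ext rfl ?_
  have hfix := pv_fix_eq (dictionary.map String.toList)
  have hline : ∀ line ∈ PySem.Chars.splitOn text.toList ['\n'],
      PySem.Chars.strip ((PySem.Chars.split₀ line).foldl
          (fun cl w => cl ++ pvAFix (dictionary.map String.toList) w ++ [' ']) [])
        = PySem.Chars.strip (PySem.Chars.join [' ']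
            ((PySem.Chars.split₀ line).map (pvBFix (pvIndex (dictionary.map String.toList))
              (PySem.Set.ofList (dictionary.map String.toList))))) := by
    intro line _
    rw [pv_line_eq]
    congr 1
    congr 1
    exact List.map_congr_left (fun w _ => (hfix w).symm)
  rw [PySem.List.foldl_append_singleton_eq_map]
  simp only [List.nil_append]
  rw [List.map_congr_left hline]
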